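-- pv_equiv track=rewrite | github.com/Denpeer/TweetMatch | synonyms.py | shrink_wordlist
-- ===== SOURCE A (Python) =====
-- def shrink_wordlist(wordlist, word_tokens, dfreq, maxGeneratedWords):
--     keylist = sorted(dfreq.keys())
--     for key in keylist:
--         #print ("%s: %s" % (key, dfreq[key]))
--         for w in dfreq[key]:
--             if w not in word_tokens:
--                 if sum(len(x) for x in wordlist) > maxGeneratedWords:
--                     for l in wordlist:
--                         if w in l:
--                             l.remove(w)
--     return wordlist
-- ===== SOURCE B (Python) =====
-- def shrink_wordlist(wordlist, word_tokens, dfreq, maxGeneratedWords):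
--     tokens = set(word_tokens)
--     total = sum(map(len, wordlist))
--     # per word: the per-sublist occurrence counts (positive ones), then sorted
--     percount = {}
--     for l in wordlist:
--         c = {}
--         for x in l:
--             c[x] = c.get(x, 0) + 1
--         for x, k in c.items():
--             percount.setdefault(x, []).append(k)
--     for cs in percount.values():
--         cs.sort()
--     # walk the word stream, counting rounds per word; a round of w removes one
--     # occurrence from every sublist still containing w, i.e. from the sublists
--     # whose initial count of w is >= t (t = round number), found by binary search
--     rounds = {}
--     for w in (w for key in sorted(dfreq) for w in dfreq[key]):
--         if total <= maxGeneratedWords: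
--             break
--         if w in tokens:
--             continue
--         t = rounds.get(w, 0) + 1
--         rounds[w] = t
--         cs = percount.get(w, [])
--         lo, hi = 0, len(cs)
--         while lo < hi:
--             mid = (lo + hi) // 2
--             if cs[mid] < t:
--                 lo = mid + 1
--             else:
--                 hi = mid
--         total -= len(cs) - lo
--     # rebuild each sublist: drop the first rounds[w] occurrences of each word w
--     for l in wordlist:
--         seen = {}
--         kept = []
--         for x in l:
--             s = seen.get(x, 0)
--             seen[x] = s + 1
--             if s >= rounds.get(x, 0):
--                 kept.append(x)
--         l[:] = kept
--     return wordlist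
-- ===== Notes on version B (the rewrite author's own statement) =====
-- stated objective: faster
-- what changed: B replaces A's word-by-word re-summing and per-sublist scans by a three-phase algorithm: build per-word sorted histograms of per-sublist occurrence counts, walk the word stream keeping only a running total and a rounds-per-word counter (each round's removal count found by binary search in the histogram, breaking once the total is within the limit), then rebuild every sublist in one pass dropping the first rounds[w] occurrences of each word w.
import Mathlib
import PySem

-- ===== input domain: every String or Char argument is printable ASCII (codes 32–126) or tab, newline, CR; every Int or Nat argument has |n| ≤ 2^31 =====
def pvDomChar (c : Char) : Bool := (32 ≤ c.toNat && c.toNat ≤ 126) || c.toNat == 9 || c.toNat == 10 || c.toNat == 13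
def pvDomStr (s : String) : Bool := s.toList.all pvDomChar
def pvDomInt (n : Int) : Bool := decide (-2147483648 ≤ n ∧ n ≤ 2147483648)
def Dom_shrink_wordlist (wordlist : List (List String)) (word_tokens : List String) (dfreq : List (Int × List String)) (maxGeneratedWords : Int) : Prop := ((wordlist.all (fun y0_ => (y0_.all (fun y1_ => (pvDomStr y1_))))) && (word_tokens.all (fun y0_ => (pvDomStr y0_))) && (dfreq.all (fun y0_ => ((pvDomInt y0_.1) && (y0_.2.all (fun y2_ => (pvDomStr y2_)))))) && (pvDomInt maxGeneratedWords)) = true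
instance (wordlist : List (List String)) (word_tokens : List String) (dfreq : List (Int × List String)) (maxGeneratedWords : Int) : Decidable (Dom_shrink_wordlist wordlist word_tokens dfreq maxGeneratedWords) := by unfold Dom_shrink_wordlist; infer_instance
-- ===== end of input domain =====

-- B replaces A's word-by-word re-summing and rescanning by per-word sorted count
-- histograms, a running total with binary-searched round sizes, and one rank-filter
-- rebuild pass; the equivalence proved is about the RETURN value only (both Pythons
-- mutate `wordlist` in place to the same final contents).

-- sum(len(x) for x in wordlist)  (shared tiny helper; used by both ports)
def pvSumLens (wl : List (List String)) : Int := (wl.map (fun l => (l.length : Int))).sum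

-- ===== PORT A =====
def shrink_wordlist (wordlist : List (List String)) (word_tokens : List String) (dfreq : List (Int × List String)) (maxGeneratedWords : Int) : List (List String) :=
  let d := PySem.Dict.ofList dfreq
  let keylist := PySem.List.sorted d.keys (fun k => k) false
  keylist.foldl (fun acc key =>
    -- dfreq[key]: key comes from keylist = keys of d, so the lookup never raises; getD is exact here
    (d.getD key []).foldl (fun acc2 w =>
      if w ∉ word_tokens then
        if pvSumLens acc2 > maxGeneratedWords then
          -- for l in wordlist: if w in l: l.remove(w)
          acc2.map (fun l => if w ∈ l then (PySem.List.remove? l w).getD l else l)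
        else acc2
      else acc2) acc) wordlist

-- ===== PORT B =====
-- B: count histograms + binary-searched round sizes + one rank-filter rebuild pass.

-- hand-written binary search of B (first index with cs[index] >= t on a sorted list)
def pvBisect (cs : List Int) (t : Int) (lo hi : Nat) : Nat :=
  if _h : lo < hi then
    let mid := (lo + hi) / 2   -- (lo + hi) // 2 on nonnegative ints: Nat division is exact here
    -- cs[mid]: mid < hi <= len(cs) at every call in B, so the default is never used
    if cs.getD mid 0 < t then pvBisect cs t (mid + 1) hi
    else pvBisect cs t lo mid
  else lo
termination_by hi - lo
decreasing_by all_goals omega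

-- the word loop of B: state (total, rounds), with the early break
def pvPhase1 (maxG : Int) (tokens : PySem.Set String) (percount : PySem.Dict String (List Int)) :
    List String → Int × PySem.Dict String Int → Int × PySem.Dict String Int
  | [], st => st
  | w :: ws, st =>
      if st.1 ≤ maxG then st
      else if w ∈ tokens then pvPhase1 maxG tokens percount ws st
      else
        let t := st.2.getD w 0 + 1
        let rounds := st.2.insert w t
        let cs := percount.getD w []
        let lo := pvBisect cs t 0 cs.length
        pvPhase1 maxG tokens percount ws (st.1 - ((cs.length : Int) - (lo : Int)), rounds)

def shrink_wordlist_alt (wordlist : List (List String)) (word_tokens : List String) (dfreq : List (Int × List String)) (maxGeneratedWords : Int) : List (List String) :=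
  let tokens := PySem.Set.ofList word_tokens
  let total := pvSumLens wordlist
  -- percount: word -> list of its per-sublist occurrence counts (hand-rolled counters)
  let percount : PySem.Dict String (List Int) :=
    wordlist.foldl (fun d l =>
      let c := l.foldl (fun c x => c.modify x 0 (· + 1)) PySem.Dict.empty
      c.items.foldl (fun d p => d.modify p.1 [] (· ++ [p.2])) d) PySem.Dict.empty
  -- for cs in percount.values(): cs.sort()   (sort each value in place)
  let percount := PySem.Dict.mk (percount.items.map (fun p => (p.1, PySem.List.sorted p.2 (fun v => v) false)))
  let d := PySem.Dict.ofList dfreq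
  let ws := (PySem.List.sorted d.keys (fun k => k) false).flatMap (fun k => d.getD k [])
  let st := pvPhase1 maxGeneratedWords tokens percount ws (total, PySem.Dict.empty)
  -- rebuild: keep an occurrence of x iff its rank (`seen`) is >= rounds[x]
  wordlist.map (fun l =>
    (l.foldl (fun (p : PySem.Dict String Int × List String) x =>
        let s := p.1.getD x 0
        (p.1.insert x (s + 1), if s ≥ st.2.getD x 0 then p.2 ++ [x] else p.2))
      (PySem.Dict.empty, [])).2)

-- ===== PRECONDITION & SPEC =====
def Spec_shrink_wordlist (wordlist : List (List String)) (word_tokens : List String) (dfreq : List (Int × List String)) (maxGeneratedWords : Int) (out : List (List String)) : Prop := out = shrink_wordlist_alt wordlist word_tokens dfreq maxGeneratedWords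
instance (wordlist : List (List String)) (word_tokens : List String) (dfreq : List (Int × List String)) (maxGeneratedWords : Int) (out : List (List String)) : Decidable (Spec_shrink_wordlist wordlist word_tokens dfreq maxGeneratedWords out) := by unfold Spec_shrink_wordlist; infer_instance

-- ===== CLAIM (what is proved, stated in full; the proofs are below) =====
def Claim_equal_shrink_wordlist : Prop := ∀ (wordlist : List (List String)) (word_tokens : List String) (dfreq : List (Int × List String)) (maxGeneratedWords : Int), Dom_shrink_wordlist wordlist word_tokens dfreq maxGeneratedWords → Spec_shrink_wordlist wordlist word_tokens dfreq maxGeneratedWords (shrink_wordlist wordlist word_tokens dfreq maxGeneratedWords)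

-- ===== LEMMAS AND PROOFS =====

-- A's inner per-word step, named for the proofs
def pvStepA (word_tokens : List String) (maxG : Int) (acc : List (List String)) (w : String) : List (List String) :=
  if w ∉ word_tokens then
    if pvSumLens acc > maxG then
      acc.map (fun l => if w ∈ l then (PySem.List.remove? l w).getD l else l)
    else acc
  else acc

-- bump a String → Int map at one point
def pvBump (σ : String → Int) (x : String) : String → Int := fun y => if y = x then σ x + 1 else σ y

-- keep an occurrence iff its rank (σ, occurrences seen so far) is ≥ its threshold r
def pvKeepGo (r : String → Int) (σ : String → Int) : List String → List String
  | [] => []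
  | x :: xs => if r x ≤ σ x then x :: pvKeepGo r (pvBump σ x) xs else pvKeepGo r (pvBump σ x) xs

lemma pvBump_self (σ : String → Int) (x : String) : pvBump σ x x = σ x + 1 := by
  simp [pvBump]

lemma pvBump_of_ne (σ : String → Int) (x y : String) (h : y ≠ x) : pvBump σ x y = σ y := by
  simp [pvBump, h]

lemma pvKeepGo_of_le (r σ : String → Int) (l : List String) (h : ∀ x, r x ≤ σ x) :
    pvKeepGo r σ l = l := by
  induction l generalizing σ with
  | nil => rfl
  | cons x xs ih =>
    have hb : ∀ y, r y ≤ pvBump σ x y := by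
      intro y
      by_cases hy : y = x
      · subst hy; rw [pvBump_self]; have := h y; omega
      · rw [pvBump_of_ne _ _ _ hy]; exact h y
    simp [pvKeepGo, h x, ih _ hb]

lemma pvKeepGo_bump_of_lt (r σ : String → Int) (w : String) (l : List String) (h : r w < σ w) :
    pvKeepGo r σ l = pvKeepGo (pvBump r w) σ l := by
  induction l generalizing σ with
  | nil => rfl
  | cons x xs ih =>
    have hb : r w < pvBump σ x w := by
      by_cases hw : w = x
      · subst hw; rw [pvBump_self]; omega
      · rw [pvBump_of_ne _ _ _ hw]; exact h
    by_cases hx : x = w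
    · subst hx
      have h1 : r x ≤ σ x := le_of_lt h
      have h2 : pvBump r x x ≤ σ x := by rw [pvBump_self]; omega
      simp only [pvKeepGo, if_pos h1, if_pos h2, ih _ hb]
    · have hcond : pvBump r w x = r x := pvBump_of_ne _ _ _ hx
      simp only [pvKeepGo, hcond, ih _ hb]

lemma pvKeepGo_erase (r σ : String → Int) (w : String) (l : List String) (h : σ w ≤ r w) :
    (pvKeepGo r σ l).erase w = pvKeepGo (pvBump r w) σ l := by
  induction l generalizing σ with
  | nil => rfl
  | cons x xs ih =>
    by_cases hx : x = w
    · subst hx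
      by_cases hk : r x ≤ σ x
      · have hσ : σ x = r x := le_antisymm h hk
        have hk2 : ¬ pvBump r x x ≤ σ x := by rw [pvBump_self]; omega
        have hlt : r x < pvBump σ x x := by rw [pvBump_self]; omega
        simp only [pvKeepGo, if_pos hk, if_neg hk2, List.erase_cons_head]
        exact pvKeepGo_bump_of_lt r (pvBump σ x) x xs hlt
      · have hk2 : ¬ pvBump r x x ≤ σ x := by rw [pvBump_self]; omega
        have hb : pvBump σ x x ≤ r x := by rw [pvBump_self]; omega
        simp only [pvKeepGo, if_neg hk, if_neg hk2]
        exact ih _ hb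
    · have hcond : pvBump r w x = r x := pvBump_of_ne _ _ _ hx
      have hb : pvBump σ x w ≤ r w := by rw [pvBump_of_ne _ _ _ (Ne.symm hx)]; exact h
      by_cases hk : r x ≤ σ x
      · have hne : ¬ (x == w) = true := by simp [hx]
        simp only [pvKeepGo, if_pos hk, hcond]
        rw [List.erase_cons_tail hne, ih _ hb]
      · simp only [pvKeepGo, if_neg hk, hcond]
        exact ih _ hb

lemma pvKeepGo_mem (r σ : String → Int) (w : String) (l : List String) (h : σ w ≤ r w) :
    w ∈ pvKeepGo r σ l ↔ r w < σ w + l.count w := by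
  induction l generalizing σ with
  | nil => simp [pvKeepGo]; omega
  | cons x xs ih =>
    by_cases hx : x = w
    · subst hx
      have hσ : pvBump σ x x = σ x + 1 := pvBump_self σ x
      by_cases hk : r x ≤ σ x
      · have hx2 : σ x = r x := le_antisymm h hk
        simp [pvKeepGo, hk, List.count_cons_self]
        omega
      · have hb : pvBump σ x x ≤ r x := by omega
        simp only [pvKeepGo, if_neg hk]
        rw [ih _ hb, hσ, List.count_cons_self]
        push_cast
        omega
    · have hσ : pvBump σ x w = σ w := pvBump_of_ne _ _ _ (Ne.symm hx)
      have hcnt : (x :: xs).count w = xs.count w :=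
        List.count_cons_of_ne hx
      have hb : pvBump σ x w ≤ r w := by rw [hσ]; exact h
      by_cases hk : r x ≤ σ x
      · simp only [pvKeepGo, if_pos hk, List.mem_cons]
        rw [hcnt]
        constructor
        · rintro (rfl | hm)
          · exact absurd rfl hx
          · have := (ih _ hb).mp hm; rwa [hσ] at this
        · intro hlt
          right
          exact (ih _ hb).mpr (by rwa [hσ])
      · simp only [pvKeepGo, if_neg hk]
        rw [ih _ hb, hσ, hcnt]

lemma pvMapStep_eq (w : String) (wl : List (List String)) :
    wl.map (fun l => if w ∈ l then (PySem.List.remove? l w).getD l else l)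
      = wl.map (fun l => l.erase w) := by
  apply List.map_congr_left
  intro l _
  by_cases hm : w ∈ l
  · simp [hm, PySem.List.remove?_eq_some_erase l w hm]
  · simp [hm, List.erase_of_not_mem hm]

lemma pvSumLens_map_erase (w : String) (wl : List (List String)) :
    pvSumLens (wl.map (fun l => l.erase w))
      = pvSumLens wl - ((wl.countP (fun l => decide (w ∈ l)) : Nat) : Int) := by
  induction wl with
  | nil => simp [pvSumLens]
  | cons l rest ih =>
    simp only [pvSumLens, List.map_cons, List.sum_cons, List.countP_cons] at *
    by_cases hm : w ∈ l
    · have hlen : l.length ≠ 0 := by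
        intro hz; rw [List.length_eq_zero_iff] at hz; subst hz; simp at hm
      simp only [List.length_erase_of_mem hm, hm, decide_true, if_true] at *
      rw [ih]; omega
    · simp only [List.erase_of_not_mem hm, hm, decide_false, Bool.false_eq_true,
        if_false] at *
      rw [ih]; omega

-- once the total is within the limit, A's loop never changes the wordlist again
lemma pvFoldA_of_le (wt : List String) (maxG : Int) (ws : List String) (wl : List (List String))
    (h : pvSumLens wl ≤ maxG) : ws.foldl (pvStepA wt maxG) wl = wl := by
  induction ws with
  | nil => rfl
  | cons w ws ih =>
    have hstep : pvStepA wt maxG wl w = wl := by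
      unfold pvStepA
      have : ¬ pvSumLens wl > maxG := not_lt.mpr h
      simp [this]
    simp [List.foldl_cons, hstep, ih]

-- countP counts a prefix when the predicate holds exactly below n
lemma pvCountP_of_prefix (cs : List Int) (p : Int → Bool) (n : Nat) (hn : n ≤ cs.length)
    (h : ∀ i (hi : i < cs.length), p cs[i] = decide (i < n)) :
    cs.countP p = n := by
  induction cs generalizing n with
  | nil =>
    simp only [List.length_nil, Nat.le_zero] at hn
    simp [hn]
  | cons x xs ih =>
    have h0 : p x = decide (0 < n) := by simpa using h 0 (by simp)
    cases n with
    | zero =>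
      simp at h0
      have hxs : xs.countP p = 0 := by
        apply ih 0 (by omega)
        intro i hi
        simpa using h (i + 1) (by simpa using Nat.succ_lt_succ hi)
      rw [List.countP_cons, h0, hxs]
      simp
    | succ m =>
      simp at h0
      have hxs : xs.countP p = m := by
        apply ih m (by simpa using hn)
        intro i hi
        have := h (i + 1) (by simpa using Nat.succ_lt_succ hi)
        simpa [Nat.succ_lt_succ_iff] using this
      rw [List.countP_cons, h0, hxs]
      simp

lemma pvBisect_below (cs : List Int) (t : Int) (hs : cs.Pairwise (· ≤ ·)) :
    ∀ (k lo hi : Nat), hi - lo = k → lo ≤ hi → hi ≤ cs.length →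
      (∀ i (h : i < cs.length), i < lo → cs[i] < t) →
      (∀ i (h : i < cs.length), hi ≤ i → ¬ (cs[i] < t)) →
      pvBisect cs t lo hi = cs.countP (fun c => decide (c < t)) := by
  intro k
  induction k using Nat.strong_induction_on with
  | _ k ihk =>
    intro lo hi hk hle hlen hlow hhigh
    rw [pvBisect]
    by_cases hlt : lo < hi
    · rw [dif_pos hlt]
      have hmidlt : (lo + hi) / 2 < hi := by omega
      have hmidge : lo ≤ (lo + hi) / 2 := by omega
      have hmidlen : (lo + hi) / 2 < cs.length := by omega
      have hgetd : cs.getD ((lo + hi) / 2) 0 = cs[(lo + hi) / 2] :=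
        List.getD_eq_getElem cs 0 hmidlen
      have hmono : ∀ i j (hi' : i < cs.length) (hj : j < cs.length), i ≤ j → cs[i] ≤ cs[j] := by
        intro i j hi' hj hij
        rcases Nat.lt_or_ge i j with hij' | hij'
        · exact (List.pairwise_iff_getElem.mp hs) i j hi' hj hij'
        · have : i = j := by omega
          subst this; exact le_refl _
      by_cases hc : cs.getD ((lo + hi) / 2) 0 < t
      · rw [if_pos hc]
        apply ihk (hi - ((lo + hi) / 2 + 1)) (by omega) _ _ rfl (by omega) hlen
        · intro i hI hilt
          rcases Nat.lt_or_ge i lo with hl | hl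
          · exact hlow i hI hl
          · calc cs[i] ≤ cs[(lo + hi) / 2] := hmono i _ hI hmidlen (by omega)
              _ < t := by rwa [hgetd] at hc
        · exact hhigh
      · rw [if_neg hc]
        apply ihk ((lo + hi) / 2 - lo) (by omega) _ _ rfl (by omega) (by omega) hlow
        intro i hI hge
        have : cs[(lo + hi) / 2] ≤ cs[i] := hmono _ i hmidlen hI hge
        rw [hgetd] at hc
        omega
    · rw [dif_neg hlt]
      have : lo = hi := by omega
      subst this
      symm
      apply pvCountP_of_prefix cs _ lo (by omega)
      intro i hI
      by_cases hil : i < lo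
      · simp [hlow i hI hil, hil]
      · simp [hhigh i hI (by omega), hil]

lemma pvBisect_spec (cs : List Int) (t : Int) (hs : cs.Pairwise (· ≤ ·)) :
    pvBisect cs t 0 cs.length = cs.countP (fun c => decide (c < t)) := by
  apply pvBisect_below cs t hs (cs.length) 0 cs.length rfl (by omega) (le_refl _)
  · intro i h hi; omega
  · intro i h hge; omega

lemma pvCountP_ge_eq (cs : List Int) (t : Int) :
    ((cs.countP (fun c => decide (t ≤ c)) : Nat) : Int)
      = (cs.length : Int) - ((cs.countP (fun c => decide (c < t)) : Nat) : Int) := by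
  induction cs with
  | nil => simp
  | cons c rest ih =>
    rw [List.countP_cons, List.countP_cons]
    by_cases hc : t ≤ c
    · simp [hc, not_lt.mpr hc]; push_cast at *; omega
    · simp [hc, lt_of_not_ge hc]; push_cast at *; omega

-- the percount build: value at w = the per-sublist counts of w (positives, in order)
lemma pvFilter_map_nodup (l' : List String) (g : String → Int) (w : String) (hnd : l'.Nodup) :
    ((l'.map (fun x => (x, g x))).filter (fun p => p.1 == w))
      = if w ∈ l' then [(w, g w)] else [] := by
  induction l' with
  | nil => simp
  | cons x rest ih =>
    rw [List.map_cons, List.filter_cons]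
    rcases List.nodup_cons.mp hnd with ⟨hx, hrest⟩
    by_cases hxw : x = w
    · subst hxw
      have : ((x, g x).1 == x) = true := by simp
      simp only [this, if_true, List.mem_cons, true_or]
      have : ((rest.map (fun x_1 => (x_1, g x_1))).filter (fun p => p.1 == x)) = [] := by
        rw [ih hrest, if_neg hx]
      simp [this]
    · have hbe : ((x, g x).1 == w) = false := by simp [hxw]
      simp only [hbe, Bool.false_eq_true, if_false, ih hrest, List.mem_cons]
      by_cases hm : w ∈ rest
      · rw [if_pos hm, if_pos (Or.inr hm)]
      · rw [if_neg hm, if_neg (by rintro (rfl | hh); exacts [hxw rfl, hm hh])]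

lemma pvPercount_getD (wl : List (List String)) (w : String) :
    ∀ (d : PySem.Dict String (List Int)),
    (wl.foldl (fun d l =>
        (l.foldl (fun c x => c.modify x 0 (· + 1)) PySem.Dict.empty).items.foldl
          (fun d p => d.modify p.1 [] (· ++ [p.2])) d) d).getD w []
      = d.getD w [] ++ wl.flatMap (fun l => if w ∈ l then [(l.count w : Int)] else []) := by
  induction wl with
  | nil => intro d; simp
  | cons l rest ih =>
    intro d
    rw [List.foldl_cons, ih, List.flatMap_cons]
    have hc : (l.foldl (fun c x => c.modify x 0 (· + 1)) PySem.Dict.empty) = PySem.Dict.counter l :=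
      (PySem.Dict.counter_eq_foldl l).symm
    rw [hc, PySem.Dict.getD_foldl_modify_append, PySem.Dict.items_counter,
        pvFilter_map_nodup _ _ _ (PySem.Set.nodup_ofList l)]
    by_cases hm : w ∈ l
    · rw [if_pos ((PySem.Set.mem_ofList l w).mpr hm), if_pos hm]
      simp
    · rw [if_neg (fun hh => hm ((PySem.Set.mem_ofList l w).mp hh)), if_neg hm]
      simp

-- reading a value-mapped Dict.mk
lemma pvGet?_mk_map {ν ν' : Type} (items : List (String × ν)) (f : ν → ν') (k : String) :
    (PySem.Dict.mk (items.map (fun p => (p.1, f p.2)))).get? k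
      = ((PySem.Dict.mk items).get? k).map f := by
  induction items with
  | nil => rfl
  | cons p rest ih =>
    rw [List.map_cons]
    show (PySem.Dict.mk ((p.1, f p.2) :: rest.map _)).get? k = _
    rw [PySem.Dict.get?_mk_cons, PySem.Dict.get?_mk_cons]
    by_cases hp : (p.1 == k) = true
    · simp [hp]
    · simp [hp, ih]

lemma pvGetD_mk_map {ν ν' : Type} (items : List (String × ν)) (f : ν → ν') (k : String) (v0 : ν') :
    (PySem.Dict.mk (items.map (fun p => (p.1, f p.2)))).getD k v0
      = match (PySem.Dict.mk items).get? k with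
        | some x => f x
        | none => v0 := by
  unfold PySem.Dict.getD
  rw [pvGet?_mk_map]
  cases (PySem.Dict.mk items).get? k <;> rfl

-- filter of a (key, value) listing over a nodup key list

lemma pvCountP_flat (wl : List (List String)) (w : String) (t : Int) (ht : 1 ≤ t) :
    (wl.flatMap (fun l => if w ∈ l then [(l.count w : Int)] else [])).countP (fun c => decide (t ≤ c))
      = wl.countP (fun l => decide (t ≤ (l.count w : Int))) := by
  induction wl with
  | nil => rfl
  | cons l rest ih =>
    rw [List.flatMap_cons, List.countP_append, ih, List.countP_cons]
    by_cases hm : w ∈ l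
    · rw [if_pos hm]
      simp [List.countP_cons, Nat.add_comm]
    · rw [if_neg hm]
      have hc : l.count w = 0 := List.count_eq_zero.mpr hm
      have : decide (t ≤ (l.count w : Int)) = false := by
        simp [hc]; omega
      simp [this]

-- phase 2 computes the rank filter
lemma pvPhase2_eq (r : String → Int) (l : List String) :
    ∀ (σd : PySem.Dict String Int) (σ : String → Int) (acc : List String),
      (∀ x, σd.getD x 0 = σ x) →
      (l.foldl (fun (p : PySem.Dict String Int × List String) x =>
          let s := p.1.getD x 0
          (p.1.insert x (s + 1), if s ≥ r x then p.2 ++ [x] else p.2)) (σd, acc)).2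
        = acc ++ pvKeepGo r σ l := by
  induction l with
  | nil => intro σd σ acc hσ; simp [pvKeepGo]
  | cons x xs ih =>
    intro σd σ acc hσ
    rw [List.foldl_cons]
    have hσ' : ∀ y, (σd.insert x (σd.getD x 0 + 1)).getD y 0 = pvBump σ x y := by
      intro y
      rw [PySem.Dict.getD_insert]
      by_cases hy : y = x
      · subst hy; rw [pvBump_self, hσ, if_pos rfl]
      · rw [if_neg hy, pvBump_of_ne _ _ _ hy, hσ]
    by_cases hk : r x ≤ σ x
    · have hc : (σd.getD x 0 ≥ r x) = True := by simp [hσ, hk]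
      simp only [hσ x, ge_iff_le, if_pos hk]
      rw [show pvKeepGo r σ (x :: xs) = x :: pvKeepGo r (pvBump σ x) xs from by
        simp [pvKeepGo, hk]]
      rw [ih _ _ _ (by simpa [hσ x] using hσ')]
      simp
    · have hc : ¬ (σd.getD x 0 ≥ r x) := by rw [hσ]; exact hk
      simp only [ge_iff_le, if_neg hc]
      rw [show pvKeepGo r σ (x :: xs) = pvKeepGo r (pvBump σ x) xs from by
        simp [pvKeepGo, hk]]
      exact ih _ _ _ (by simpa [hσ x] using hσ')

def pvZeroF : String → Int := fun _ => 0

-- the main phase-1 simulation: B's (total, rounds) bookkeeping tracks A's fold exactly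
lemma pvPhase1_main (wt : List String) (maxG : Int) (wl0 : List (List String))
    (pc : PySem.Dict String (List Int))
    (hsort : ∀ w, (pc.getD w []).Pairwise (· ≤ ·))
    (hcnt : ∀ w (t : Int), 1 ≤ t →
      (pc.getD w []).countP (fun c => decide (t ≤ c))
        = wl0.countP (fun l => decide (t ≤ (l.count w : Int)))) :
    ∀ (ws : List String) (rounds : PySem.Dict String Int) (total : Int),
      (∀ x, 0 ≤ rounds.getD x 0) →
      total = pvSumLens (wl0.map (pvKeepGo (fun x => rounds.getD x 0) pvZeroF)) →
      ws.foldl (pvStepA wt maxG) (wl0.map (pvKeepGo (fun x => rounds.getD x 0) pvZeroF))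
        = wl0.map (pvKeepGo
            (fun x => (pvPhase1 maxG (PySem.Set.ofList wt) pc ws (total, rounds)).2.getD x 0)
            pvZeroF) := by
  intro ws
  induction ws with
  | nil => intro rounds total _ _; rfl
  | cons w ws ih =>
    intro rounds total hnn htotal
    rw [List.foldl_cons, pvPhase1]
    by_cases hle : total ≤ maxG
    · rw [if_pos hle]
      have hsum : pvSumLens (wl0.map (pvKeepGo (fun x => rounds.getD x 0) pvZeroF)) ≤ maxG := by
        rw [← htotal]; exact hle
      have hstep : pvStepA wt maxG (wl0.map (pvKeepGo (fun x => rounds.getD x 0) pvZeroF)) w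
          = wl0.map (pvKeepGo (fun x => rounds.getD x 0) pvZeroF) := by
        unfold pvStepA
        simp [not_lt.mpr hsum]
      rw [hstep, pvFoldA_of_le _ _ _ _ hsum]
    · rw [if_neg hle]
      by_cases htok : w ∈ wt
      · have hmem : w ∈ PySem.Set.ofList wt := (PySem.Set.mem_ofList wt w).mpr htok
        rw [if_pos hmem]
        have hstep : pvStepA wt maxG (wl0.map (pvKeepGo (fun x => rounds.getD x 0) pvZeroF)) w
            = wl0.map (pvKeepGo (fun x => rounds.getD x 0) pvZeroF) := by
          unfold pvStepA; simp [htok]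
        rw [hstep]
        exact ih rounds total hnn htotal
      · have hmem : ¬ w ∈ PySem.Set.ofList wt := fun hh => htok ((PySem.Set.mem_ofList wt w).mp hh)
        rw [if_neg hmem]
        have hgt : pvSumLens (wl0.map (pvKeepGo (fun x => rounds.getD x 0) pvZeroF)) > maxG := by
          rw [← htotal]; omega
        have hstep : pvStepA wt maxG (wl0.map (pvKeepGo (fun x => rounds.getD x 0) pvZeroF)) w
            = (wl0.map (pvKeepGo (fun x => rounds.getD x 0) pvZeroF)).map (fun l => l.erase w) := by
          unfold pvStepA
          rw [if_pos htok, if_pos hgt, pvMapStep_eq]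
        -- the erase round bumps the threshold of w
        have herase : (wl0.map (pvKeepGo (fun x => rounds.getD x 0) pvZeroF)).map (fun l => l.erase w)
            = wl0.map (pvKeepGo (pvBump (fun x => rounds.getD x 0) w) pvZeroF) := by
          rw [List.map_map]
          apply List.map_congr_left
          intro l _
          exact pvKeepGo_erase _ _ _ l (hnn w)
        have hrr : (fun x => (rounds.insert w (rounds.getD w 0 + 1)).getD x 0)
            = pvBump (fun x => rounds.getD x 0) w := by
          funext y
          rw [PySem.Dict.getD_insert]
          by_cases hy : y = w
          · subst hy; rw [if_pos rfl, pvBump_self]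
          · rw [if_neg hy, pvBump_of_ne _ _ _ hy]
        have hnn' : ∀ x, 0 ≤ (rounds.insert w (rounds.getD w 0 + 1)).getD x 0 := by
          intro x
          rw [PySem.Dict.getD_insert]
          by_cases hx : x = w
          · rw [if_pos hx]; have := hnn w; omega
          · rw [if_neg hx]; exact hnn x
        -- the removed count: len cs - bisect = #sublists still containing w
        have ht1 : (1 : Int) ≤ rounds.getD w 0 + 1 := by have := hnn w; omega
        have hbis : pvBisect (pc.getD w []) (rounds.getD w 0 + 1) 0 (pc.getD w []).length
            = (pc.getD w []).countP (fun c => decide (c < rounds.getD w 0 + 1)) :=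
          pvBisect_spec _ _ (hsort w)
        have hcount : ((pc.getD w []).length : Int)
              - ((pc.getD w []).countP (fun c => decide (c < rounds.getD w 0 + 1)) : Nat)
            = ((wl0.map (pvKeepGo (fun x => rounds.getD x 0) pvZeroF)).countP
                (fun l => decide (w ∈ l)) : Nat) := by
          rw [← pvCountP_ge_eq, hcnt w _ ht1, List.countP_map]
          norm_cast
          apply List.countP_congr
          intro l _
          have hmemiff := pvKeepGo_mem (fun x => rounds.getD x 0) pvZeroF w l (hnn w)
          simp only [Function.comp_def, decide_eq_true_eq]
          rw [hmemiff]
          simp only [pvZeroF]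
          omega
        have htotal' : total - (((pc.getD w []).length : Int)
              - (pvBisect (pc.getD w []) (rounds.getD w 0 + 1) 0 (pc.getD w []).length : Nat))
            = pvSumLens (wl0.map (pvKeepGo (pvBump (fun x => rounds.getD x 0) w) pvZeroF)) := by
          rw [← herase, pvSumLens_map_erase, htotal, hbis, hcount]
        have := ih (rounds.insert w (rounds.getD w 0 + 1))
          (total - (((pc.getD w []).length : Int)
            - (pvBisect (pc.getD w []) (rounds.getD w 0 + 1) 0 (pc.getD w []).length : Nat)))
          hnn' (by rw [hrr]; exact htotal')
        rw [hrr] at this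
        rw [hstep, herase, this]

-- a fold over a flattened list is the nested fold
lemma pvFoldl_flatMap {κ α β : Type} (ks : List κ) (f : κ → List α)
    (g : β → α → β) (init : β) :
    (ks.flatMap f).foldl g init = ks.foldl (fun s k => (f k).foldl g s) init := by
  induction ks generalizing init with
  | nil => rfl
  | cons k ks ih => simp [List.flatMap_cons, List.foldl_append, ih]

-- ===== VERDICT (by name: the statement is the Claim_ definition above) =====
-- proof-side names for the terms built inside shrink_wordlist_alt
def pvPercountD (wl0 : List (List String)) : PySem.Dict String (List Int) :=
  wl0.foldl (fun d l =>
    (l.foldl (fun c x => c.modify x 0 (· + 1)) PySem.Dict.empty).items.foldl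
      (fun d p => d.modify p.1 [] (· ++ [p.2])) d) PySem.Dict.empty

def pvPcSorted (wl0 : List (List String)) : PySem.Dict String (List Int) :=
  PySem.Dict.mk ((pvPercountD wl0).items.map
    (fun p => (p.1, PySem.List.sorted p.2 (fun v => v) false)))

def pvWs (dfreq : List (Int × List String)) : List String :=
  (PySem.List.sorted (PySem.Dict.ofList dfreq).keys (fun k => k) false).flatMap
    (fun k => (PySem.Dict.ofList dfreq).getD k [])

theorem shrink_wordlist_spec : Claim_equal_shrink_wordlist := by
  intro wl0 wt dfreq maxG _
  unfold Spec_shrink_wordlist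
  have h0 : ∀ x : String, (PySem.Dict.empty : PySem.Dict String Int).getD x 0 = pvZeroF x := by
    intro x; rw [PySem.Dict.getD_empty]; rfl
  have hid : wl0.map (pvKeepGo (fun x => (PySem.Dict.empty : PySem.Dict String Int).getD x 0) pvZeroF) = wl0 := by
    have hpt : ∀ l ∈ wl0,
        pvKeepGo (fun x => (PySem.Dict.empty : PySem.Dict String Int).getD x 0) pvZeroF l = id l := by
      intro l _
      apply pvKeepGo_of_le
      intro x
      rw [PySem.Dict.getD_empty]
      simp [pvZeroF]
    rw [List.map_congr_left hpt, List.map_id]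
  have hsort : ∀ w, (((pvPcSorted wl0).getD w []) : List Int).Pairwise (· ≤ ·) := by
    intro w
    rw [pvPcSorted, pvGetD_mk_map (pvPercountD wl0).items
      (fun cs => PySem.List.sorted cs (fun v => v) false) w []]
    cases hq : (pvPercountD wl0).get? w with
    | none => simp
    | some x => simpa using PySem.List.sorted_pairwise x (fun v => v)
  have hcnt : ∀ w (t : Int), 1 ≤ t →
      ((pvPcSorted wl0).getD w []).countP (fun c => decide (t ≤ c))
        = wl0.countP (fun l => decide (t ≤ (l.count w : Int))) := by
    intro w t ht
    have hflat := pvPercount_getD wl0 w PySem.Dict.empty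
    rw [PySem.Dict.getD_empty, List.nil_append] at hflat
    rw [pvPcSorted, pvGetD_mk_map (pvPercountD wl0).items
      (fun cs => PySem.List.sorted cs (fun v => v) false) w []]
    cases hq : (pvPercountD wl0).get? w with
    | none =>
      have hx : (pvPercountD wl0).getD w [] = [] := by
        unfold PySem.Dict.getD; rw [hq]; rfl
      rw [pvPercountD] at hx
      rw [← pvCountP_flat wl0 w t ht, ← hflat, hx]
    | some x =>
      have hx : x = (pvPercountD wl0).getD w [] := by
        unfold PySem.Dict.getD; rw [hq]; rfl
      rw [pvPercountD] at hx
      calc (PySem.List.sorted x (fun v => v) false).countP (fun c => decide (t ≤ c))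
          = x.countP (fun c => decide (t ≤ c)) :=
            (PySem.List.sorted_perm x (fun v => v) false).countP_eq _
        _ = wl0.countP (fun l => decide (t ≤ (l.count w : Int))) := by
            rw [hx, hflat]
            exact pvCountP_flat wl0 w t ht
  have hA : shrink_wordlist wl0 wt dfreq maxG
      = (pvWs dfreq).foldl (pvStepA wt maxG) wl0 := by
    simp only [shrink_wordlist, pvWs]
    rw [pvFoldl_flatMap]
    rfl
  have hB : shrink_wordlist_alt wl0 wt dfreq maxG
      = wl0.map (pvKeepGo (fun x =>
          (pvPhase1 maxG (PySem.Set.ofList wt) (pvPcSorted wl0) (pvWs dfreq)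
            (pvSumLens wl0, PySem.Dict.empty)).2.getD x 0) pvZeroF) := by
    simp only [shrink_wordlist_alt, pvPcSorted, pvPercountD, pvWs]
    apply List.map_congr_left
    intro l _
    have := pvPhase2_eq (fun x =>
        (pvPhase1 maxG (PySem.Set.ofList wt)
          (PySem.Dict.mk ((pvPercountD wl0).items.map
            (fun p => (p.1, PySem.List.sorted p.2 (fun v => v) false))))
          (pvWs dfreq)
          (pvSumLens wl0, PySem.Dict.empty)).2.getD x 0) l PySem.Dict.empty pvZeroF [] h0
    rw [pvPercountD, pvWs] at this
    simpa using this
  have hmain := pvPhase1_main wt maxG wl0 (pvPcSorted wl0) hsort hcnt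
    (pvWs dfreq) PySem.Dict.empty (pvSumLens wl0)
    (fun x => by rw [PySem.Dict.getD_empty])
    (by rw [hid])
  rw [hid] at hmain
  rw [hA, hB, hmain]
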